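-- pv_equiv track=rewrite | github.com/rubelw/OSSS | src/OSSS/ai/agents/query_data/handlers/grade_scale_bands_handler.py | _select_grade_scale_bands_fields
-- ===== SOURCE A (Python) =====
-- from typing import Any, Dict, List, Sequence
--
-- def _select_grade_scale_bands_fields(
--     rows: Sequence[Dict[str, Any]],
-- ) -> List[str]:
--     """
--     Choose a stable, user-friendly column ordering, but gracefully
--     include any extra keys that the API returns.
--     """
--     if not rows:
--         return []
--
--     # Adjust this preferred order to match your actual grade_scale_bands schema.
--     preferred_order = [
--         "id",
--         "grade_scale_id",
--         "band_code",
--         "band_name",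
--         "description",
--         "min_score",
--         "max_score",
--         "min_percentage",
--         "max_percentage",
--         "gpa_points",
--         "letter_grade",
--         "is_passing",
--         "is_active",
--         "created_at",
--         "updated_at",
--     ]
--
--     all_keys: List[str] = []
--     for r in rows:
--         for k in r.keys():
--             if k not in all_keys:
--                 all_keys.append(k)
--
--     ordered = [k for k in preferred_order if k in all_keys]
--     ordered.extend(k for k in all_keys if k not in ordered)
--     return ordered
-- ===== SOURCE B (Python) =====
-- from typing import Any, Dict, List, Sequence
--
--
-- def _select_grade_scale_bands_fields(
--     rows: Sequence[Dict[str, Any]],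
-- ) -> List[str]:
--     if not rows:
--         return []
--
--     preferred_order = [
--         "id",
--         "grade_scale_id",
--         "band_code",
--         "band_name",
--         "description",
--         "min_score",
--         "max_score",
--         "min_percentage",
--         "max_percentage",
--         "gpa_points",
--         "letter_grade",
--         "is_passing",
--         "is_active",
--         "created_at",
--         "updated_at",
--     ]
--
--     # One pass: record each key's first-seen index (the dict also dedups).
--     first: Dict[str, int] = {}
--     for r in rows:
--         for k in r.keys():
--             if k not in first:
--                 first[k] = len(first)
--
--     p = len(preferred_order)
--     # Rank: position in preferred_order if present there, else past all
--     # preferred ranks in first-seen order.  Ranks are unique, so the sort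
--     # order is fully determined.
--     return sorted(
--         first,
--         key=lambda k: preferred_order.index(k) if k in preferred_order else p + first[k],
--     )
-- ===== Notes on version B (the rewrite author's own statement) =====
-- stated objective: faster
-- what changed: Replaces the quadratic build of all_keys plus two filtered passes (a preferred-order scan and an extras scan with list membership tests) by a single pass recording each key's first-seen index in a dict, then one sort of the unique keys by a numeric rank (preferred position, else len(preferred)+first-seen index).
import Mathlib
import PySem

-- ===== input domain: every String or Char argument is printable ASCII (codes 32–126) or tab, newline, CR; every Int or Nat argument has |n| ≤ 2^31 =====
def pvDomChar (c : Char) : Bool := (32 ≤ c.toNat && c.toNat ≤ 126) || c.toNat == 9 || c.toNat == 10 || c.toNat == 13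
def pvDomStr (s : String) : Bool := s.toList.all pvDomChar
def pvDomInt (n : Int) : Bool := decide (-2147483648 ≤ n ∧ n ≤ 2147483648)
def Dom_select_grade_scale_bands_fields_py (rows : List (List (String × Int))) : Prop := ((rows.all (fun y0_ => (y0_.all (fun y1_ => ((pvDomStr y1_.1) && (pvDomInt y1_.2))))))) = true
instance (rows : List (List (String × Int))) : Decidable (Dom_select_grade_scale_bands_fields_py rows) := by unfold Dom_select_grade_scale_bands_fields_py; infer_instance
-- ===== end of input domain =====

-- B replaces A's dedup-list build plus two filtered passes by a first-seen-index dict and one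
-- sort of the unique keys by a numeric rank (measurably faster: no list membership scans).

-- the preferred_order literal both Pythons contain
def pvPreferred : List String :=
  ["id", "grade_scale_id", "band_code", "band_name", "description", "min_score", "max_score",
   "min_percentage", "max_percentage", "gpa_points", "letter_grade", "is_passing", "is_active",
   "created_at", "updated_at"]

-- ===== PORT A =====
def select_grade_scale_bands_fields_py (rows : List (List (String × Int))) : List String :=
  if rows = [] then []
  else
    -- all_keys: first-seen dedup of the rows' keys
    let all_keys : List String :=
      rows.foldl (fun acc r =>
        r.foldl (fun acc2 kv => if kv.1 ∈ acc2 then acc2 else acc2 ++ [kv.1]) acc) []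
    -- ordered = [k for k in preferred_order if k in all_keys]
    let ordered : List String := pvPreferred.filter (fun k => decide (k ∈ all_keys))
    -- ordered.extend(k for k in all_keys if k not in ordered): extend appends while the
    -- generator tests membership in the growing list — ported as a fold over the same state
    all_keys.foldl (fun o k => if k ∈ o then o else o ++ [k]) ordered

-- ===== PORT B =====
def select_grade_scale_bands_fields_py_alt (rows : List (List (String × Int))) : List String :=
  if rows = [] then []
  else
    -- first[k] = first-seen index of key k (the dict also dedups)
    let first : PySem.Dict String Int :=
      rows.foldl (fun d r =>
        r.foldl (fun d2 kv => if d2.contains kv.1 then d2 else d2.insert kv.1 (d2.size : Int)) d)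
        PySem.Dict.empty
    let p : Int := (pvPreferred.length : Int)
    -- sorted(first, key=lambda k: preferred_order.index(k) if k in preferred_order else p + first[k])
    -- (k is always a key of `first`, so Python's first[k] never raises; getD is exact here)
    PySem.List.sorted first.keys
      (fun k => match PySem.List.index? pvPreferred k with
                | some i => (i : Int)
                | none => p + first.getD k 0) false

-- ===== PRECONDITION & SPEC =====
def Spec_select_grade_scale_bands_fields_py (rows : List (List (String × Int))) (out : List String) : Prop := out = select_grade_scale_bands_fields_py_alt rows
instance (rows : List (List (String × Int))) (out : List String) : Decidable (Spec_select_grade_scale_bands_fields_py rows out) := by unfold Spec_select_grade_scale_bands_fields_py; infer_instance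

-- ===== CLAIM (what is proved, stated in full; the proofs are below) =====
def Claim_equal_select_grade_scale_bands_fields_py : Prop := ∀ (rows : List (List (String × Int))), Dom_select_grade_scale_bands_fields_py rows → Spec_select_grade_scale_bands_fields_py rows (select_grade_scale_bands_fields_py rows)

-- ===== LEMMAS AND PROOFS =====

-- the flattened key stream of the rows
def pvKeys (rows : List (List (String × Int))) : List String :=
  (rows.map (fun r => r.map Prod.fst)).flatten

-- A's dedup step / B's dict step, flattened
def pvStepU (acc : List String) (k : String) : List String :=
  if k ∈ acc then acc else acc ++ [k]

def pvStepD (d : PySem.Dict String Int) (k : String) : PySem.Dict String Int :=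
  if d.contains k then d else d.insert k (d.size : Int)

-- A's nested fold = flat fold over the key stream
theorem pvA_flat (rows : List (List (String × Int))) :
    rows.foldl (fun acc r =>
      r.foldl (fun acc2 kv => if kv.1 ∈ acc2 then acc2 else acc2 ++ [kv.1]) acc) []
      = (pvKeys rows).foldl pvStepU [] := by
  rw [pvKeys, List.foldl_flatten, List.foldl_map]
  congr 1; funext acc r; rw [List.foldl_map]; rfl

-- B's nested fold = flat fold over the key stream
theorem pvB_flat (rows : List (List (String × Int))) :
    rows.foldl (fun d r =>
      r.foldl (fun d2 kv => if d2.contains kv.1 then d2 else d2.insert kv.1 (d2.size : Int)) d)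
      PySem.Dict.empty
      = (pvKeys rows).foldl pvStepD PySem.Dict.empty := by
  rw [pvKeys, List.foldl_flatten, List.foldl_map]
  congr 1; funext d r; rw [List.foldl_map]; rfl

-- the dedup fold is PySem.Set.ofList (so its result is Nodup)
theorem pvU_eq_ofList (K : List String) :
    K.foldl pvStepU [] = PySem.Set.ofList K := by
  simp only [PySem.Set.ofList]
  congr 1; funext acc k; simp [PySem.Set.add, pvStepU]

-- joint invariant of the two flat folds: the dict's keys are exactly the dedup list,
-- and each key's stored value is its index in that list
theorem pvSim (K : List String) (acc : List String) (d : PySem.Dict String Int)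
    (hk : d.keys = acc)
    (hv : ∀ k i, PySem.List.index? acc k = some i → d.get? k = some (i : Int)) :
    (K.foldl pvStepD d).keys = K.foldl pvStepU acc ∧
      (∀ k i, PySem.List.index? (K.foldl pvStepU acc) k = some i →
        (K.foldl pvStepD d).get? k = some (i : Int)) := by
  induction K generalizing acc d with
  | nil => exact ⟨hk, hv⟩
  | cons x K ih =>
    simp only [List.foldl_cons]
    by_cases hx : x ∈ acc
    · have hc : d.contains x = true := by
        rw [PySem.Dict.contains_iff_mem_keys, hk]; exact hx
      rw [pvStepD, pvStepU, if_pos hc, if_pos hx]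
      exact ih acc d hk hv
    · have hc : d.contains x = false := by
        rw [Bool.eq_false_iff, ne_eq, PySem.Dict.contains_iff_mem_keys, hk]; exact hx
      rw [pvStepD, pvStepU, if_neg (by simp [hc]), if_neg hx]
      refine ih (acc ++ [x]) (d.insert x d.size) ?_ ?_
      · rw [PySem.Dict.keys_insert_of_not_contains _ _ hc, hk]
      · intro k i hi
        by_cases hkx : k = x
        · subst hkx
          rw [PySem.List.index?_append_singleton_self _ _ hx] at hi
          obtain rfl : acc.length = i := by simpa using hi
          rw [PySem.Dict.get?_insert_self]
          have hlen : d.size = acc.length := by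
            have : d.keys.length = acc.length := by rw [hk]
            simpa [PySem.Dict.size, PySem.Dict.keys] using this
          rw [hlen]
        · have hmem : k ∈ acc ++ [x] :=
            (PySem.List.index?_isSome_iff (acc ++ [x]) k).mp (by rw [hi]; rfl)
          have hka : k ∈ acc := by
            rcases List.mem_append.mp hmem with h | h
            · exact h
            · simp at h; exact absurd h hkx
          rw [PySem.List.index?_append_of_mem _ hka] at hi
          rw [PySem.Dict.get?_insert_of_ne _ _ hkx]
          exact hv k i hi

-- A's extend-loop: over a Nodup list whose members are in `base` iff they are preferred,
-- it appends exactly the non-preferred members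
theorem pvExtend (xs : List String) (base : List String)
    (hnd : xs.Nodup) (hb : ∀ k ∈ xs, k ∈ base ↔ k ∈ pvPreferred) :
    xs.foldl (fun o k => if k ∈ o then o else o ++ [k]) base
      = base ++ xs.filter (fun k => !decide (k ∈ pvPreferred)) := by
  induction xs generalizing base with
  | nil => simp
  | cons x xs ih =>
    obtain ⟨hx, hnd⟩ := List.nodup_cons.mp hnd
    simp only [List.foldl_cons, List.filter_cons]
    by_cases hp : x ∈ pvPreferred
    · rw [if_pos ((hb x (by simp)).mpr hp)]
      rw [show (!decide (x ∈ pvPreferred)) = false by simp [hp], if_neg (by simp)]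
      exact ih base hnd (fun k hk => hb k (by simp [hk]))
    · rw [if_neg (fun h => hp ((hb x (by simp)).mp h))]
      have : (!decide (x ∈ pvPreferred)) = true := by simp [hp]
      rw [this, if_pos rfl]
      rw [ih (base ++ [x]) hnd ?_]
      · simp
      · intro k hk
        have hkx : k ≠ x := fun h => hx (h ▸ hk)
        simp only [List.mem_append, List.mem_singleton, hkx, or_false]
        exact hb k (by simp [hk])

-- a Nodup list is pairwise index?-increasing
theorem pvPairwiseIndex (l : List String) (h : l.Nodup) :
    l.Pairwise (fun a b => ∀ i j, PySem.List.index? l a = some i →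
      PySem.List.index? l b = some j → i < j) := by
  induction l with
  | nil => exact List.Pairwise.nil
  | cons x xs ih =>
    obtain ⟨hx, hnd⟩ := List.nodup_cons.mp h
    refine List.Pairwise.cons ?_ ((ih hnd).imp_of_mem ?_)
    · intro b hb i j hi hj
      rw [PySem.List.index?_cons_self] at hi
      have hbx : x ≠ b := fun h => hx (h ▸ hb)
      rw [PySem.List.index?_cons_of_ne _ hbx] at hj
      obtain rfl : (0 : Nat) = i := by simpa using hi
      rcases Option.map_eq_some_iff.mp hj with ⟨j', _, rfl⟩
      omega
    · intro a b ha hb hab i j hi hj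
      have hax : x ≠ a := fun h => hx (h ▸ ha)
      have hbx : x ≠ b := fun h => hx (h ▸ hb)
      rw [PySem.List.index?_cons_of_ne _ hax] at hi
      rw [PySem.List.index?_cons_of_ne _ hbx] at hj
      rcases Option.map_eq_some_iff.mp hi with ⟨i', hi', rfl⟩
      rcases Option.map_eq_some_iff.mp hj with ⟨j', hj', rfl⟩
      have := hab i' j' hi' hj'
      omega

theorem pvIndexLt {l : List String} {a : String} {i : Nat}
    (h : PySem.List.index? l a = some i) : i < l.length := by
  rw [PySem.List.index?_eq_some_iff] at h
  obtain ⟨pre, suf, rfl, rfl, -⟩ := h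
  simp

-- membership in A's ordered list, for keys of the rows
theorem pvOrderedMem (U : List String) (k : String) (hk : k ∈ U) :
    k ∈ pvPreferred.filter (fun k => decide (k ∈ U)) ↔ k ∈ pvPreferred := by
  simp [List.mem_filter, hk]

-- ===== VERDICT (by name: the statement is the Claim_ definition above) =====
theorem select_grade_scale_bands_fields_py_spec : Claim_equal_select_grade_scale_bands_fields_py := by
  unfold Claim_equal_select_grade_scale_bands_fields_py
  intro rows _
  unfold Spec_select_grade_scale_bands_fields_py
  by_cases hr : rows = []
  · simp [select_grade_scale_bands_fields_py, select_grade_scale_bands_fields_py_alt, hr]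
  · simp only [select_grade_scale_bands_fields_py, select_grade_scale_bands_fields_py_alt,
      if_neg hr]
    rw [pvA_flat, pvB_flat]
    set K := pvKeys rows with hK
    set U := K.foldl pvStepU [] with hU
    obtain ⟨hkeys, hget⟩ := pvSim K [] PySem.Dict.empty (by simp [pysem])
      (by intro k i hi; simp [PySem.List.index?] at hi)
    have hU_nodup : U.Nodup := by
      rw [hU, pvU_eq_ofList]; exact PySem.Set.nodup_ofList K
    set d := K.foldl pvStepD PySem.Dict.empty with hd
    set keyf : String → Int := fun k =>
      match PySem.List.index? pvPreferred k with
      | some i => (i : Int)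
      | none => (pvPreferred.length : Int) + d.getD k 0 with hkeyf
    set ordered : List String := pvPreferred.filter (fun k => decide (k ∈ U)) with hordered
    have hb : ∀ k ∈ U, k ∈ ordered ↔ k ∈ pvPreferred := fun k hk => pvOrderedMem U k hk
    rw [hkeys, pvExtend U ordered hU_nodup hb]
    set extras : List String := U.filter (fun k => !decide (k ∈ pvPreferred)) with hextras
    have hkey_pref : ∀ a i, PySem.List.index? pvPreferred a = some i → keyf a = (i : Int) := by
      intro a i hi; rw [hkeyf]; simp only [hi]
    have hkey_extra : ∀ a i, a ∉ pvPreferred → PySem.List.index? U a = some i →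
        keyf a = (pvPreferred.length : Int) + (i : Int) := by
      intro a i hp hi
      have hnone : PySem.List.index? pvPreferred a = none :=
        (PySem.List.index?_eq_none_iff _ _).mpr hp
      have hgd : d.getD a 0 = (i : Int) := by
        rw [PySem.Dict.getD_eq_get?_getD, hget a i hi]; rfl
      rw [hkeyf]; simp only [hnone, hgd]
    have hidx : ∀ a ∈ pvPreferred, ∃ i, PySem.List.index? pvPreferred a = some i := by
      intro a ha
      exact Option.isSome_iff_exists.mp ((PySem.List.index?_isSome_iff _ _).mpr ha)
    have hidxU : ∀ a ∈ U, ∃ i, PySem.List.index? U a = some i := by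
      intro a ha
      exact Option.isSome_iff_exists.mp ((PySem.List.index?_isSome_iff _ _).mpr ha)
    have hperm1 : ordered.Perm (U.filter (fun k => decide (k ∈ pvPreferred))) := by
      refine (List.perm_ext_iff_of_nodup ?_ ?_).mpr ?_
      · exact (by decide : pvPreferred.Nodup).filter _
      · exact hU_nodup.filter _
      · intro a; simp only [hordered, List.mem_filter, decide_eq_true_eq]; tauto
    have hperm : (ordered ++ extras).Perm U :=
      (hperm1.append_right extras).trans (List.filter_append_perm _ U)
    have hpw : (ordered ++ extras).Pairwise (fun a b => keyf a < keyf b) := by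
      rw [List.pairwise_append]
      refine ⟨?_, ?_, ?_⟩
      · refine ((pvPairwiseIndex pvPreferred (by decide)).sublist
          (List.filter_sublist)).imp_of_mem ?_
        intro a b ha hb hab
        obtain ⟨i, hi⟩ := hidx a (List.mem_of_mem_filter ha)
        obtain ⟨j, hj⟩ := hidx b (List.mem_of_mem_filter hb)
        rw [hkey_pref a i hi, hkey_pref b j hj]
        exact_mod_cast hab i j hi hj
      · refine ((pvPairwiseIndex U hU_nodup).sublist (List.filter_sublist)).imp_of_mem ?_
        intro a b ha hb hab
        have hpa : a ∉ pvPreferred := by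
          have := List.of_mem_filter ha; simpa using this
        have hpb : b ∉ pvPreferred := by
          have := List.of_mem_filter hb; simpa using this
        obtain ⟨i, hi⟩ := hidxU a (List.mem_of_mem_filter ha)
        obtain ⟨j, hj⟩ := hidxU b (List.mem_of_mem_filter hb)
        rw [hkey_extra a i hpa hi, hkey_extra b j hpb hj]
        have := hab i j hi hj
        omega
      · intro a ha b hb
        have hpb : b ∉ pvPreferred := by
          have := List.of_mem_filter hb; simpa using this
        obtain ⟨i, hi⟩ := hidx a (List.mem_of_mem_filter ha)
        obtain ⟨j, hj⟩ := hidxU b (List.mem_of_mem_filter hb)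
        rw [hkey_pref a i hi, hkey_extra b j hpb hj]
        have := pvIndexLt hi
        omega
    exact (PySem.List.sorted_eq_of_perm_of_pairwise_lt U (ordered ++ extras) keyf hperm hpw).symm
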